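-- pv_equiv track=rewrite | github.com/thangquang09/da-agent-project | evals/metrics/spider_exact_match.py | _extract_order_by
-- ===== SOURCE A (Python) =====
-- def _extract_order_by(items: list[str]) -> frozenset[str]:
--     result = set()
--     current = ""
--     for tok in items:
--         if tok.upper() in ("LIMIT", "OFFSET"):
--             if current.strip():
--                 result.add(current.strip().lower())
--             current = ""
--         elif tok.upper() in ("ASC", "DESC"):
--             current += " " + tok
--         else:
--             current += tok + " "
--     if current.strip():
--         result.add(current.strip().lower())
--     return frozenset(result)
-- ===== SOURCE B (Python) =====
-- def _extract_order_by(items: list[str]) -> frozenset[str]: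
--     # Phase 1: split tokens into segments at LIMIT/OFFSET delimiters (delimiter dropped).
--     segments = [[]]
--     for tok in items:
--         if tok.upper() in ("LIMIT", "OFFSET"):
--             segments.append([])
--         else:
--             segments[-1].append(tok)
--     # Phase 2: format each segment, keeping the original spacing rule, then normalize.
--     out = set()
--     for seg in segments:
--         s = ""
--         for tok in seg:
--             if tok.upper() in ("ASC", "DESC"):
--                 s += " " + tok
--             else:
--                 s += tok + " "
--         s = s.strip().lower()
--         if s:
--             out.add(s)
--     return frozenset(out)
-- ===== Notes on version B (the rewrite author's own statement) =====
-- stated objective: alternative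
-- what changed: Replaces A's single accumulate-and-flush loop carrying a growing string with a two-phase structure: first split the token list into segments at LIMIT/OFFSET delimiters, then format/normalize each segment independently and collect the nonempty results.
import Mathlib
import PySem

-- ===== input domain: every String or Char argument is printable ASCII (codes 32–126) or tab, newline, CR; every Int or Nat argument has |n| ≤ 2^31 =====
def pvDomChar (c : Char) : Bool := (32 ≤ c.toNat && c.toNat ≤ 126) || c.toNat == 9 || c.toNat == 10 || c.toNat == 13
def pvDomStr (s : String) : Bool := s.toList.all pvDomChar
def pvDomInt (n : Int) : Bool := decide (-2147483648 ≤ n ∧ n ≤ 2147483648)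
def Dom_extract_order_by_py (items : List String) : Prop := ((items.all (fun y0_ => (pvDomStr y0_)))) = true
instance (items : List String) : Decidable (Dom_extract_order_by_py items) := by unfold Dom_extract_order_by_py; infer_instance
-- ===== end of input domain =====

-- B replaces A's accumulate-and-flush loop by a split-into-segments pass followed by a
-- per-segment format/normalize pass (objective: alternative decomposition, same cost).

-- ===== PORT A =====
def extract_order_by_py (items : List String) : List String :=
  let st := items.foldl (fun (p : PySem.Set String × String) tok =>
    if PySem.Str.upper tok = "LIMIT" ∨ PySem.Str.upper tok = "OFFSET" then
      (if PySem.Str.strip p.2 ≠ "" then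
         PySem.Set.add p.1 (PySem.Str.lower (PySem.Str.strip p.2)) else p.1, "")
    else if PySem.Str.upper tok = "ASC" ∨ PySem.Str.upper tok = "DESC" then
      (p.1, p.2 ++ " " ++ tok)
    else
      (p.1, p.2 ++ tok ++ " ")) (PySem.Set.empty, "")
  if PySem.Str.strip st.2 ≠ "" then
    PySem.Set.add st.1 (PySem.Str.lower (PySem.Str.strip st.2)) else st.1

-- ===== PORT B =====
-- segment formatting: same spacing rule as the original (' '+tok for ASC/DESC, tok+' ' otherwise)
def pvFmtSeg (seg : List String) : String :=
  seg.foldl (fun s tok =>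
    if PySem.Str.upper tok = "ASC" ∨ PySem.Str.upper tok = "DESC" then s ++ " " ++ tok
    else s ++ tok ++ " ") ""

def extract_order_by_py_alt (items : List String) : List String :=
  -- phase 1: split into segments at LIMIT/OFFSET (delimiter dropped);
  -- state = (completed segments, segment under construction) — 'segments[:-1]' and 'segments[-1]'
  let st := items.foldl (fun (p : List (List String) × List String) tok =>
    if PySem.Str.upper tok = "LIMIT" ∨ PySem.Str.upper tok = "OFFSET" then
      (p.1 ++ [p.2], [])
    else
      (p.1, p.2 ++ [tok])) ([], [])
  let segments := st.1 ++ [st.2]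
  -- phase 2: format each segment, normalize, keep the nonempty ones
  segments.foldl (fun out seg =>
    let s := PySem.Str.lower (PySem.Str.strip (pvFmtSeg seg))
    if s ≠ "" then PySem.Set.add out s else out) PySem.Set.empty

-- ===== PRECONDITION & SPEC =====
def Spec_extract_order_by_py (items : List String) (out : List String) : Prop := out = extract_order_by_py_alt items
instance (items : List String) (out : List String) : Decidable (Spec_extract_order_by_py items out) := by unfold Spec_extract_order_by_py; infer_instance

-- ===== CLAIM (what is proved, stated in full; the proofs are below) =====
def Claim_equal_extract_order_by_py : Prop := ∀ (items : List String), Dom_extract_order_by_py items → Spec_extract_order_by_py items (extract_order_by_py items)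

-- ===== LEMMAS AND PROOFS =====

-- A's flush: add the normalized current string if it strips to nonempty
def pvAddIf (r : PySem.Set String) (cur : String) : PySem.Set String :=
  if PySem.Str.strip cur ≠ "" then
    PySem.Set.add r (PySem.Str.lower (PySem.Str.strip cur)) else r

-- A's loop step
def pvStepA (p : PySem.Set String × String) (tok : String) : PySem.Set String × String :=
  if PySem.Str.upper tok = "LIMIT" ∨ PySem.Str.upper tok = "OFFSET" then
    (pvAddIf p.1 p.2, "")
  else if PySem.Str.upper tok = "ASC" ∨ PySem.Str.upper tok = "DESC" then
    (p.1, p.2 ++ " " ++ tok)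
  else
    (p.1, p.2 ++ tok ++ " ")

-- B's phase-1 step
def pvStepSeg (p : List (List String) × List String) (tok : String) : List (List String) × List String :=
  if PySem.Str.upper tok = "LIMIT" ∨ PySem.Str.upper tok = "OFFSET" then
    (p.1 ++ [p.2], [])
  else
    (p.1, p.2 ++ [tok])

-- B's phase 2, with the step rewritten to pvAddIf (justified by pvLower_eq_empty below)
def pvRunB (r : PySem.Set String) (segs : List (List String)) : PySem.Set String :=
  segs.foldl (fun out seg => pvAddIf out (pvFmtSeg seg)) r

lemma pvLower_eq_empty (s : String) : (PySem.Str.lower s = "") ↔ (s = "") := by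
  constructor
  · intro h
    have := congrArg String.toList h
    simp [PySem.Str.toList_lower, PySem.Chars.lower] at this
    exact this
  · intro h; subst h; rfl

lemma pvStepB_eq (out : PySem.Set String) (seg : List String) :
    (let s := PySem.Str.lower (PySem.Str.strip (pvFmtSeg seg));
     if s ≠ "" then PySem.Set.add out s else out) = pvAddIf out (pvFmtSeg seg) := by
  simp only [pvAddIf]
  by_cases h : PySem.Str.strip (pvFmtSeg seg) = ""
  · simp [h, pvLower_eq_empty]
  · simp [h, (pvLower_eq_empty _).not.mpr h]

lemma pvFmtSeg_concat (cur : List String) (tok : String) :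
    pvFmtSeg (cur ++ [tok]) =
      (if PySem.Str.upper tok = "ASC" ∨ PySem.Str.upper tok = "DESC" then
        pvFmtSeg cur ++ " " ++ tok else pvFmtSeg cur ++ tok ++ " ") := by
  simp [pvFmtSeg, List.foldl_append]

-- phase 1 started from (completed, cur) only prepends 'completed'
lemma pvSegFold_shift (items : List String) :
    ∀ (completed : List (List String)) (cur : List String),
    items.foldl pvStepSeg (completed, cur) =
      (completed ++ (items.foldl pvStepSeg ([], cur)).1, (items.foldl pvStepSeg ([], cur)).2) := by
  induction items with
  | nil => intro completed cur; simp
  | cons tok ts ih =>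
    intro completed cur
    simp only [List.foldl_cons]
    by_cases h : PySem.Str.upper tok = "LIMIT" ∨ PySem.Str.upper tok = "OFFSET"
    · have e1 : pvStepSeg (completed, cur) tok = (completed ++ [cur], []) := by
        simp [pvStepSeg, h]
      have e2 : pvStepSeg (([] : List (List String)), cur) tok = ([cur], []) := by
        simp [pvStepSeg, h]
      rw [e1, e2, ih (completed ++ [cur]) [], ih [cur] []]
      simp
    · have e1 : pvStepSeg (completed, cur) tok = (completed, cur ++ [tok]) := by
        simp [pvStepSeg, h]
      have e2 : pvStepSeg (([] : List (List String)), cur) tok = ([], cur ++ [tok]) := by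
        simp [pvStepSeg, h]
      rw [e1, e2]
      exact ih completed (cur ++ [tok])

-- the segments B's phase 1 produces when the segment under construction already holds 'cur'
def pvSegTail (items : List String) (cur : List String) : List (List String) :=
  (items.foldl pvStepSeg ([], cur)).1 ++ [(items.foldl pvStepSeg ([], cur)).2]

-- main invariant: A's loop from (r, formatted cur) + final flush = B's phase 2 over pvSegTail
lemma pvMain (items : List String) :
    ∀ (r : PySem.Set String) (cur : List String),
    (let st := items.foldl pvStepA (r, pvFmtSeg cur);
     pvAddIf st.1 st.2) = pvRunB r (pvSegTail items cur) := by
  induction items with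
  | nil =>
    intro r cur
    simp [pvSegTail, pvRunB]
  | cons tok ts ih =>
    intro r cur
    simp only [List.foldl_cons]
    by_cases h : PySem.Str.upper tok = "LIMIT" ∨ PySem.Str.upper tok = "OFFSET"
    · have hstep : pvStepA (r, pvFmtSeg cur) tok = (pvAddIf r (pvFmtSeg cur), pvFmtSeg []) := by
        simp [pvStepA, h, pvFmtSeg]
      rw [hstep, ih (pvAddIf r (pvFmtSeg cur)) []]
      have hseg : pvSegTail (tok :: ts) cur = cur :: pvSegTail ts [] := by
        have e2 : pvStepSeg (([] : List (List String)), cur) tok = ([cur], []) := by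
          simp [pvStepSeg, h]
        simp only [pvSegTail, List.foldl_cons, e2]
        rw [pvSegFold_shift ts [cur] []]
        simp
      rw [hseg]
      simp [pvRunB]
    · have hseg : pvSegTail (tok :: ts) cur = pvSegTail ts (cur ++ [tok]) := by
        simp only [pvSegTail, List.foldl_cons, pvStepSeg, if_neg h]
      by_cases h2 : PySem.Str.upper tok = "ASC" ∨ PySem.Str.upper tok = "DESC"
      · have hstep : pvStepA (r, pvFmtSeg cur) tok = (r, pvFmtSeg (cur ++ [tok])) := by
          simp [pvStepA, h, h2, pvFmtSeg_concat]
        rw [hstep, ih r (cur ++ [tok]), hseg]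
      · have hstep : pvStepA (r, pvFmtSeg cur) tok = (r, pvFmtSeg (cur ++ [tok])) := by
          simp [pvStepA, h, h2, pvFmtSeg_concat]
        rw [hstep, ih r (cur ++ [tok]), hseg]

lemma pvA_eq (items : List String) :
    extract_order_by_py items =
      (let st := items.foldl pvStepA (PySem.Set.empty, pvFmtSeg []);
       pvAddIf st.1 st.2) := rfl

lemma pvB_eq (items : List String) :
    extract_order_by_py_alt items = pvRunB PySem.Set.empty (pvSegTail items []) := by
  have hf : (fun (out : PySem.Set String) (seg : List String) =>
        let s := PySem.Str.lower (PySem.Str.strip (pvFmtSeg seg));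
        if s ≠ "" then PySem.Set.add out s else out)
      = fun (out : PySem.Set String) (seg : List String) => pvAddIf out (pvFmtSeg seg) := by
    funext out seg
    exact pvStepB_eq out seg
  have h0 : extract_order_by_py_alt items =
      ((items.foldl pvStepSeg ([], [])).1 ++ [(items.foldl pvStepSeg ([], [])).2]).foldl
        (fun (out : PySem.Set String) (seg : List String) =>
          let s := PySem.Str.lower (PySem.Str.strip (pvFmtSeg seg));
          if s ≠ "" then PySem.Set.add out s else out) PySem.Set.empty := rfl
  rw [h0, hf]
  rfl

-- ===== VERDICT (by name: the statement is the Claim_ definition above) =====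
theorem extract_order_by_py_spec : Claim_equal_extract_order_by_py := by
  intro items _
  show extract_order_by_py items = extract_order_by_py_alt items
  rw [pvA_eq, pvB_eq, pvMain]
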